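-- pv_equiv track=rewrite | github.com/AlexeiVartoumian/algorithmicProblems | HackerRank/Binary Search/triplesum.py | triplessum
-- ===== SOURCE A (Python) =====
-- def triplessum(a,b,c):
--     a = list(set(a))
--     b = list(set(b))
--     c = list(set(c))
--     a.sort()
--     b.sort()
--     c.sort()
--     left = 0
--     right = 0
--     final = 0
--     groups = []
--     while left < len(a):
--         combo = []
--         combo.append(a[left])
--         while right < len(b) and  b[right] < a[left]:
--             right+=1
--         if right < len(b) and b[right] >= a[left]:
--                 for j in range(right, len(b)):
--                     temp = combo.copy()
--                     temp.append(b[j])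
--                     while final < len(c) and c[final] > b[j]:
--                         final+=1
--                     if final < len(c) and c[final] <=b[j]:
--                         for i in range(final, len(c)):
--                             combination = temp.copy()
--                             if c[i] <= temp[-1]:
--                                 combination.append(c[i])
--                                 groups.append(combination)
--                             else:
--                                 break
--                     final = 0
--         left+=1
--         right = 0
--         final = 0
--     return len(groups)
-- ===== SOURCE B (Python) =====
-- def triplessum(a, b, c):
--     A = set(a)
--     C = set(c)
--     return sum(
--         sum(1 for x in A if x <= v) * sum(1 for y in C if y <= v)
--         for v in set(b)
--     )
-- ===== Notes on version B (the rewrite author's own statement) =====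
-- stated objective: faster
-- what changed: Replaces the sorted three-pointer nested scans that materialise every qualifying triple with a direct sum over distinct b of (#distinct a <= b) * (#distinct c <= b), no sorting and no list of groups.
import Mathlib
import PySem

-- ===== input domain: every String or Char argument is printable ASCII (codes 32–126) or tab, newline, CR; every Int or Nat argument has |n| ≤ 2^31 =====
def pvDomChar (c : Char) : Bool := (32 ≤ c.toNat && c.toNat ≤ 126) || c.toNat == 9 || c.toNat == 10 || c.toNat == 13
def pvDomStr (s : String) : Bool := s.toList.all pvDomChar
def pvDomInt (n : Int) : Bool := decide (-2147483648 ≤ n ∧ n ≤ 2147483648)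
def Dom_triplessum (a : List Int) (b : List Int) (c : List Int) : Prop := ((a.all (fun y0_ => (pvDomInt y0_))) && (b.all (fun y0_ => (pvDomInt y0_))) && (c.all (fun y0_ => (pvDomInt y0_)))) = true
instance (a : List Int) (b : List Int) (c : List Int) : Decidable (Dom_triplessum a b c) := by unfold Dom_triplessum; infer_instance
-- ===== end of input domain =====

-- B replaces A's sorted three-pointer scans (which materialise every qualifying triple in `groups`)
-- with a direct sum over distinct b of (#distinct a ≤ b) * (#distinct c ≤ b); objective: faster.

-- ===== PORT A =====

-- inner 'for i in range(final, len(c)): combination = temp.copy(); if c[i] <= temp[-1]: append … else: break'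
-- temp[-1] ported as (pyGet? temp (-1)).getD 0: temp is nonempty at every call site, so this is exact.
def pvInnerA (cs : List Int) (temp : List Int) (i : Nat) (groups : List (List Int)) : List (List Int) :=
  if h : i < cs.length then
    let combination := temp
    if cs[i] ≤ (PySem.List.pyGet? temp (-1)).getD 0 then
      pvInnerA cs temp (i + 1) (groups ++ [combination ++ [cs[i]]])
    else groups
  else groups
termination_by cs.length - i

-- 'while final < len(c) and c[final] > b[j]: final += 1'
def pvWhileFinalA (cs : List Int) (bj : Int) (f : Nat) : Nat :=
  if h : f < cs.length then
    if bj < cs[f] then pvWhileFinalA cs bj (f + 1) else f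
  else f
termination_by cs.length - f

-- 'for j in range(right, len(b)): temp = [a[left], b[j]]; while-final from 0; guarded inner loop'
-- (the locals temp / final / the updated groups are inlined at their unique use sites)
def pvForJA (bs cs : List Int) (al : Int) (j : Nat) (groups : List (List Int)) : List (List Int) :=
  if h : j < bs.length then
    pvForJA bs cs al (j + 1)
      (if h2 : pvWhileFinalA cs bs[j] 0 < cs.length then
        if cs[pvWhileFinalA cs bs[j] 0] ≤ bs[j] then
          pvInnerA cs ([al] ++ [bs[j]]) (pvWhileFinalA cs bs[j] 0) groups
        else groups
      else groups)
  else groups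
termination_by bs.length - j

-- 'while right < len(b) and b[right] < a[left]: right += 1'
def pvWhileRightA (bs : List Int) (al : Int) (r : Nat) : Nat :=
  if h : r < bs.length then
    if bs[r] < al then pvWhileRightA bs al (r + 1) else r
  else r
termination_by bs.length - r

-- outer 'while left < len(a)': right recomputed from 0 each iteration ('right = 0' at the end of the body)
def pvOuterA (as bs cs : List Int) (l : Nat) (groups : List (List Int)) : List (List Int) :=
  if h : l < as.length then
    pvOuterA as bs cs (l + 1)
      (if h2 : pvWhileRightA bs as[l] 0 < bs.length then
        if as[l] ≤ bs[pvWhileRightA bs as[l] 0] then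
          pvForJA bs cs as[l] (pvWhileRightA bs as[l] 0) groups
        else groups
      else groups)
  else groups
termination_by as.length - l

def triplessum (a : List Int) (b : List Int) (c : List Int) : Int :=
  let as := PySem.List.sorted (PySem.Set.ofList a) (fun x => x) false
  let bs := PySem.List.sorted (PySem.Set.ofList b) (fun x => x) false
  let cs := PySem.List.sorted (PySem.Set.ofList c) (fun x => x) false
  ((pvOuterA as bs cs 0 []).length : Int)

-- ===== PORT B =====

-- sum(1 for x in s if x <= v)
def pvCntB (s : PySem.Set Int) (v : Int) : Int :=
  s.foldl (fun acc x => if x ≤ v then acc + 1 else acc) 0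

def triplessum_alt (a : List Int) (b : List Int) (c : List Int) : Int :=
  let A := PySem.Set.ofList a
  let C := PySem.Set.ofList c
  -- sum over set(b); ints under +, so the set's iteration order cannot affect the value
  (PySem.Set.ofList b).foldl (fun acc v => acc + pvCntB A v * pvCntB C v) 0

-- ===== PRECONDITION & SPEC =====
def Spec_triplessum (a : List Int) (b : List Int) (c : List Int) (out : Int) : Prop := out = triplessum_alt a b c
instance (a : List Int) (b : List Int) (c : List Int) (out : Int) : Decidable (Spec_triplessum a b c out) := by unfold Spec_triplessum; infer_instance

-- ===== CLAIM (what is proved, stated in full; the proofs are below) =====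
def Claim_equal_triplessum : Prop := ∀ (a : List Int) (b : List Int) (c : List Int), Dom_triplessum a b c → Spec_triplessum a b c (triplessum a b c)

-- ===== LEMMAS AND PROOFS =====

-- the common value both programs compute: Σ_{v ∈ bs} (#as ≤ v) · (#cs ≤ v), in Nat
def pvSpecSum (as bs cs : List Int) : Nat :=
  (bs.map (fun v => as.countP (fun x => x ≤ v) * cs.countP (fun x => x ≤ v))).sum

lemma pvInnerA_len (cs temp : List Int) (i : Nat) (groups : List (List Int)) :
    (pvInnerA cs temp i groups).length =
      groups.length + ((cs.drop i).takeWhile (fun x => x ≤ (PySem.List.pyGet? temp (-1)).getD 0)).length := by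
  induction i, groups using pvInnerA.induct cs temp with
  | case1 i groups h combination hle ih =>
      rw [pvInnerA, dif_pos h, if_pos hle, ih, List.drop_eq_getElem_cons h,
        List.takeWhile_cons_of_pos (by simpa using hle)]
      simp; omega
  | case2 i groups h hle =>
      rw [pvInnerA, dif_pos h, if_neg hle, List.drop_eq_getElem_cons h,
        List.takeWhile_cons_of_neg (by simpa using hle)]
      simp
  | case3 i groups h =>
      rw [pvInnerA, dif_neg h, List.drop_eq_nil_of_le (by omega)]
      simp

lemma pvWhileFinalA_eq (cs : List Int) (bj : Int) (f : Nat) :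
    pvWhileFinalA cs bj f = f + ((cs.drop f).takeWhile (fun x => bj < x)).length := by
  induction f using pvWhileFinalA.induct cs bj with
  | case1 f h hlt ih =>
      rw [pvWhileFinalA, dif_pos h, if_pos hlt, ih, List.drop_eq_getElem_cons h,
        List.takeWhile_cons_of_pos (by simpa using hlt)]
      simp; omega
  | case2 f h hlt =>
      rw [pvWhileFinalA, dif_pos h, if_neg hlt, List.drop_eq_getElem_cons h,
        List.takeWhile_cons_of_neg (by simpa using hlt)]
      simp
  | case3 f h =>
      rw [pvWhileFinalA, dif_neg h, List.drop_eq_nil_of_le (by omega)]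
      simp

lemma pvWhileRightA_eq (bs : List Int) (al : Int) (r : Nat) :
    pvWhileRightA bs al r = r + ((bs.drop r).takeWhile (fun x => x < al)).length := by
  induction r using pvWhileRightA.induct bs al with
  | case1 r h hlt ih =>
      rw [pvWhileRightA, dif_pos h, if_pos hlt, ih, List.drop_eq_getElem_cons h,
        List.takeWhile_cons_of_pos (by simpa using hlt)]
      simp; omega
  | case2 r h hlt =>
      rw [pvWhileRightA, dif_pos h, if_neg hlt, List.drop_eq_getElem_cons h,
        List.takeWhile_cons_of_neg (by simpa using hlt)]
      simp
  | case3 r h =>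
      rw [pvWhileRightA, dif_neg h, List.drop_eq_nil_of_le (by omega)]
      simp

-- on a ≤-sorted list the ≤-prefix is the ≤-count
lemma takeWhile_le_len (cs : List Int) (v : Int) (hs : cs.Pairwise (· ≤ ·)) :
    (cs.takeWhile (fun x => x ≤ v)).length = cs.countP (fun x => x ≤ v) := by
  induction cs with
  | nil => simp
  | cons x xs ih =>
      rcases List.pairwise_cons.mp hs with ⟨hx, hp⟩
      by_cases hxv : x ≤ v
      · rw [List.takeWhile_cons_of_pos (by simpa using hxv), List.countP_cons]
        simp [hxv, ih hp]
      · rw [List.takeWhile_cons_of_neg (by simpa using hxv)]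
        rw [List.countP_eq_zero.mpr]
        · simp
        · intro y hy
          simp only [List.mem_cons] at hy
          rcases hy with rfl | hy
          · simpa using hxv
          · have := hx y hy; simp; omega

-- per-j contribution: the guarded inner loop adds exactly countP (≤ bj) cs new groups
lemma pvForJA_step (cs : List Int) (al bj : Int) (groups : List (List Int)) (hs : cs.Pairwise (· ≤ ·)) :
    (if h2 : pvWhileFinalA cs bj 0 < cs.length then
        if cs[pvWhileFinalA cs bj 0] ≤ bj then pvInnerA cs ([al] ++ [bj]) (pvWhileFinalA cs bj 0) groups else groups
      else groups).length = groups.length + cs.countP (fun x => x ≤ bj) := by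
  have hget : (PySem.List.pyGet? ([al] ++ [bj]) (-1)).getD 0 = bj := by
    simp [PySem.List.pyGet?, PySem.List.pyIdx?]
  cases cs with
  | nil => simp
  | cons c0 cs' =>
      by_cases h0 : c0 ≤ bj
      · have hf : pvWhileFinalA (c0 :: cs') bj 0 = 0 := by
          rw [pvWhileFinalA_eq]
          simp only [List.drop_zero]
          rw [List.takeWhile_cons_of_neg (by simp only [decide_eq_true_eq, not_lt]; exact h0)]
          simp
        rw [hf]
        rw [dif_pos (by simp)]
        rw [if_pos (by simpa using h0)]
        rw [pvInnerA_len, hget]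
        simp only [List.drop_zero]
        rw [takeWhile_le_len _ _ hs]
      · -- c0 > bj: every element of the sorted list exceeds bj
        have hall : ∀ x ∈ c0 :: cs', bj < x := by
          intro y hy
          rcases List.mem_cons.mp hy with rfl | hy
          · omega
          · have := (List.pairwise_cons.mp hs).1 y hy; omega
        have hf : pvWhileFinalA (c0 :: cs') bj 0 = (c0 :: cs').length := by
          rw [pvWhileFinalA_eq]
          simp only [List.drop_zero, Nat.zero_add]
          rw [List.takeWhile_eq_self_iff.mpr (by intro x hx; simpa using hall x hx)]
        rw [hf, dif_neg (by omega)]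
        rw [List.countP_eq_zero.mpr (by intro y hy; have := hall y hy; simp; omega)]
        simp

lemma pvForJA_len (bs cs : List Int) (al : Int) (j : Nat) (groups : List (List Int)) (hs : cs.Pairwise (· ≤ ·)) :
    (pvForJA bs cs al j groups).length =
      groups.length + ((bs.drop j).map (fun v => cs.countP (fun x => x ≤ v))).sum := by
  induction j, groups using pvForJA.induct bs cs al with
  | case1 j groups h ih =>
      rw [pvForJA, dif_pos h]
      simp only [dite_eq_ite] at ih
      rw [ih, List.drop_eq_getElem_cons h, List.map_cons, List.sum_cons]
      have := pvForJA_step cs al (bs[j]) groups hs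
      omega
  | case2 j groups h =>
      rw [pvForJA, dif_neg h, List.drop_eq_nil_of_le (by omega)]
      simp

-- on a ≤-sorted list, dropping the < al prefix is filtering for ≥ al
lemma dropWhile_filter (bs : List Int) (al : Int) (hs : bs.Pairwise (· ≤ ·)) :
    bs.drop ((bs.takeWhile (fun x => x < al)).length) = bs.filter (fun v => al ≤ v) := by
  induction bs with
  | nil => rfl
  | cons x xs ih =>
      rcases List.pairwise_cons.mp hs with ⟨hx, hp⟩
      by_cases hxa : x < al
      · rw [List.takeWhile_cons_of_pos (by simpa using hxa)]
        simp only [List.length_cons, List.drop_succ_cons, List.filter_cons]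
        rw [ih hp]
        simp [show ¬ (al ≤ x) by omega]
      · rw [List.takeWhile_cons_of_neg (by simpa using hxa)]
        simp only [List.length_nil, List.drop_zero]
        rw [Eq.comm, List.filter_eq_self]
        intro y hy
        simp only [List.mem_cons] at hy
        rcases hy with rfl | hy
        · simp; omega
        · have := hx y hy; simp; omega

-- per-left contribution: right lands on the first b ≥ al, then forJ adds the sum over all b ≥ al
lemma pvOuterA_step (bs cs : List Int) (al : Int) (groups : List (List Int))
    (hb : bs.Pairwise (· ≤ ·)) (hc : cs.Pairwise (· ≤ ·)) :
    (if h2 : pvWhileRightA bs al 0 < bs.length then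
        if al ≤ bs[pvWhileRightA bs al 0] then
          pvForJA bs cs al (pvWhileRightA bs al 0) groups
        else groups
      else groups).length =
      groups.length + ((bs.filter (fun v => al ≤ v)).map (fun v => cs.countP (fun x => x ≤ v))).sum := by
  have hr : pvWhileRightA bs al 0 = (bs.takeWhile (fun x => x < al)).length := by
    rw [pvWhileRightA_eq]; simp
  have hdf := dropWhile_filter bs al hb
  by_cases h2 : pvWhileRightA bs al 0 < bs.length
  · have hmem : bs[pvWhileRightA bs al 0] ∈ bs.filter (fun v => al ≤ v) := by
      rw [← hdf, ← hr]
      have : (bs.drop (pvWhileRightA bs al 0))[0]'(by simp; omega) = bs[pvWhileRightA bs al 0] := by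
        rw [List.getElem_drop]; congr 1
      rw [← this]
      exact List.getElem_mem _
    have hle : al ≤ bs[pvWhileRightA bs al 0] := by
      have := (List.mem_filter.mp hmem).2; simpa using this
    rw [dif_pos h2, if_pos hle, pvForJA_len _ _ _ _ _ hc, hr, hdf]
  · rw [dif_neg h2]
    have : bs.filter (fun v => al ≤ v) = [] := by
      rw [← hdf]
      exact List.drop_eq_nil_of_le (by omega)
    rw [this]
    simp

lemma pvOuterA_len (as bs cs : List Int) (l : Nat) (groups : List (List Int))
    (hb : bs.Pairwise (· ≤ ·)) (hc : cs.Pairwise (· ≤ ·)) :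
    (pvOuterA as bs cs l groups).length =
      groups.length +
        ((as.drop l).map (fun al => ((bs.filter (fun v => al ≤ v)).map (fun v => cs.countP (fun x => x ≤ v))).sum)).sum := by
  induction l, groups using pvOuterA.induct as bs cs with
  | case1 l groups h ih =>
      rw [pvOuterA, dif_pos h]
      simp only [dite_eq_ite] at ih
      rw [ih, List.drop_eq_getElem_cons h, List.map_cons, List.sum_cons]
      have := pvOuterA_step bs cs (as[l]) groups hb hc
      omega
  | case2 l groups h =>
      rw [pvOuterA, dif_neg h, List.drop_eq_nil_of_le (by omega)]
      simp

lemma filter_map_sum (bs : List Int) (p : Int → Bool) (g : Int → Nat) :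
    ((bs.filter p).map g).sum = (bs.map (fun v => if p v then g v else 0)).sum := by
  induction bs with
  | nil => rfl
  | cons x xs ih => by_cases hx : p x <;> simp [List.filter_cons, hx, ih]

lemma sum_map_add_nat (bs : List Int) (f g : Int → Nat) :
    (bs.map (fun v => f v + g v)).sum = (bs.map f).sum + (bs.map g).sum := by
  induction bs with
  | nil => rfl
  | cons x xs ih => simp [ih]; omega

-- exchange of summation: Σ_{al∈as} Σ_{v∈bs, al≤v} g v = Σ_{v∈bs} (#as ≤ v)·g v
lemma exchange_sum (as bs : List Int) (g : Int → Nat) :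
    (as.map (fun al => ((bs.filter (fun v => al ≤ v)).map g).sum)).sum =
      (bs.map (fun v => as.countP (fun x => x ≤ v) * g v)).sum := by
  induction as with
  | nil => simp
  | cons a0 as ih =>
      rw [List.map_cons, List.sum_cons, ih, filter_map_sum]
      rw [show (fun v => (a0 :: as).countP (fun x => x ≤ v) * g v)
            = fun v => (if a0 ≤ v then g v else 0) + as.countP (fun x => x ≤ v) * g v from by
          funext v; rw [List.countP_cons]; by_cases h : a0 ≤ v <;> simp [h] <;> ring]
      rw [sum_map_add_nat]
      simp

-- A computes pvSpecSum on the sorted deduplicated lists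
lemma triplessum_eq_spec (a b c : List Int) :
    triplessum a b c =
      (pvSpecSum (PySem.List.sorted (PySem.Set.ofList a) (fun x => x) false)
        (PySem.List.sorted (PySem.Set.ofList b) (fun x => x) false)
        (PySem.List.sorted (PySem.Set.ofList c) (fun x => x) false) : Int) := by
  unfold triplessum pvSpecSum
  show ((pvOuterA (PySem.List.sorted (PySem.Set.ofList a) (fun x => x) false)
      (PySem.List.sorted (PySem.Set.ofList b) (fun x => x) false)
      (PySem.List.sorted (PySem.Set.ofList c) (fun x => x) false) 0 []).length : Int) = _
  have hb : (PySem.List.sorted (PySem.Set.ofList b) (fun x => x) false).Pairwise (· ≤ ·) :=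
    (PySem.List.sorted_ofList_pairwise_lt b).imp le_of_lt
  have hc : (PySem.List.sorted (PySem.Set.ofList c) (fun x => x) false).Pairwise (· ≤ ·) :=
    (PySem.List.sorted_ofList_pairwise_lt c).imp le_of_lt
  rw [pvOuterA_len _ _ _ _ _ hb hc]
  simp only [List.length_nil, List.drop_zero, Nat.zero_add]
  rw [exchange_sum]

-- sum(1 for x in s if x <= v) counts the elements ≤ v
lemma pvCntB_eq (s : PySem.Set Int) (v : Int) :
    pvCntB s v = (s.countP (fun x => x ≤ v) : Int) := by
  unfold pvCntB
  rw [show (fun (acc : Int) x => if x ≤ v then acc + 1 else acc)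
        = fun acc x => if (fun x => decide (x ≤ v)) x = true then acc + 1 else acc from by
      funext acc x; simp]
  rw [PySem.List.foldl_count_if]
  simp

-- B computes pvSpecSum on the deduplicated lists
lemma triplessum_alt_eq_spec (a b c : List Int) :
    triplessum_alt a b c =
      (pvSpecSum (PySem.Set.ofList a) (PySem.Set.ofList b) (PySem.Set.ofList c) : Int) := by
  unfold triplessum_alt pvSpecSum
  show (List.foldl (fun acc v => acc + pvCntB (PySem.Set.ofList a) v * pvCntB (PySem.Set.ofList c) v) 0 (PySem.Set.ofList b)) = _
  rw [show (fun (acc : Int) v => acc + pvCntB (PySem.Set.ofList a) v * pvCntB (PySem.Set.ofList c) v)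
        = fun acc v => acc + (fun v => pvCntB (PySem.Set.ofList a) v * pvCntB (PySem.Set.ofList c) v) v from rfl]
  rw [PySem.List.foldl_add]
  rw [Nat.cast_list_sum, List.map_map]
  simp only [pvCntB_eq]
  rw [zero_add]
  apply congrArg List.sum
  apply List.map_congr_left
  intro v _
  simp

-- pvSpecSum is invariant under sorting each argument (counts and the sum see only the multiset)
lemma pvSpecSum_sorted (a b c : List Int) :
    pvSpecSum (PySem.List.sorted (PySem.Set.ofList a) (fun x => x) false)
      (PySem.List.sorted (PySem.Set.ofList b) (fun x => x) false)
      (PySem.List.sorted (PySem.Set.ofList c) (fun x => x) false) =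
    pvSpecSum (PySem.Set.ofList a) (PySem.Set.ofList b) (PySem.Set.ofList c) := by
  unfold pvSpecSum
  have hpa := PySem.List.sorted_perm (PySem.Set.ofList a) (fun x => x) false
  have hpc := PySem.List.sorted_perm (PySem.Set.ofList c) (fun x => x) false
  have hpb := PySem.List.sorted_perm (PySem.Set.ofList b) (fun x => x) false
  have hfun : ∀ v : Int,
      (PySem.List.sorted (PySem.Set.ofList a) (fun x => x) false).countP (fun x => x ≤ v)
        * (PySem.List.sorted (PySem.Set.ofList c) (fun x => x) false).countP (fun x => x ≤ v)
      = (PySem.Set.ofList a).countP (fun x => x ≤ v) * (PySem.Set.ofList c).countP (fun x => x ≤ v) := by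
    intro v
    rw [hpa.countP_eq, hpc.countP_eq]
  calc (((PySem.List.sorted (PySem.Set.ofList b) (fun x => x) false)).map
          (fun v => (PySem.List.sorted (PySem.Set.ofList a) (fun x => x) false).countP (fun x => x ≤ v)
            * (PySem.List.sorted (PySem.Set.ofList c) (fun x => x) false).countP (fun x => x ≤ v))).sum
      = (((PySem.List.sorted (PySem.Set.ofList b) (fun x => x) false)).map
          (fun v => (PySem.Set.ofList a).countP (fun x => x ≤ v) * (PySem.Set.ofList c).countP (fun x => x ≤ v))).sum := by
        rw [List.map_congr_left (fun v _ => hfun v)]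
    _ = _ := (hpb.map _).sum_eq

-- ===== VERDICT (by name: the statement is the Claim_ definition above) =====
theorem triplessum_spec : Claim_equal_triplessum := by
  intro a b c _
  unfold Spec_triplessum
  rw [triplessum_eq_spec, triplessum_alt_eq_spec, pvSpecSum_sorted]
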